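-- pv_equiv track=rewrite | github.com/graphsignal/solver-demo | solutions/1000-D.py | count_good_subsequences
-- ===== SOURCE A (Python) =====
-- MOD = 998244353
--
-- def count_good_subsequences(n, sequence):
--     # dp[i] will store the number of ways to partition the subsequence a[1:i+1] into good arrays
--     dp = [0] * (n + 1)
--     dp[0] = 1  # Base case: empty subsequence
--
--     total_good_sequences = 0
--
--     # Iterate over every possible starting point
--     for i in range(n):
--         current_length = 0
--         # Check if a subarray starting from i can be a good array
--         for j in range(i, n):
--             current_length += 1
--             # Check if the subarray a[i...j] is a good array
--             if sequence[i] == current_length - 1 and sequence[i] > 0: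
--                 # If true, update the dp array at position j+1
--                 dp[j + 1] = (dp[j + 1] + dp[i]) % MOD
--
--     # Sum over all dp[j] for j from 1 to n to count all possible good subsequences
--     total_good_sequences = sum(dp[1:]) % MOD
--
--     return total_good_sequences
-- ===== SOURCE B (Python) =====
-- MOD = 998244353
--
-- def count_good_subsequences(n, sequence):
--     # O(n): the inner scan of A can only succeed at the single index j = i + sequence[i],
--     # so update dp there directly instead of scanning all j.
--     dp = [0] * (n + 1)
--     dp[0] = 1
--     for i in range(n):
--         s = sequence[i]
--         if s > 0 and i + s < n:
--             dp[i + s + 1] = (dp[i + s + 1] + dp[i]) % MOD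
--     return sum(dp[1:]) % MOD
-- ===== Notes on version B (the rewrite author's own statement) =====
-- stated objective: faster
-- what changed: The O(n) inner scan over j is replaced by a direct O(1) update: the scan's condition sequence[i] == j-i can hold for at most one j, namely j = i + sequence[i], so B updates dp[i+sequence[i]+1] directly when that index is in range.
import Mathlib
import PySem

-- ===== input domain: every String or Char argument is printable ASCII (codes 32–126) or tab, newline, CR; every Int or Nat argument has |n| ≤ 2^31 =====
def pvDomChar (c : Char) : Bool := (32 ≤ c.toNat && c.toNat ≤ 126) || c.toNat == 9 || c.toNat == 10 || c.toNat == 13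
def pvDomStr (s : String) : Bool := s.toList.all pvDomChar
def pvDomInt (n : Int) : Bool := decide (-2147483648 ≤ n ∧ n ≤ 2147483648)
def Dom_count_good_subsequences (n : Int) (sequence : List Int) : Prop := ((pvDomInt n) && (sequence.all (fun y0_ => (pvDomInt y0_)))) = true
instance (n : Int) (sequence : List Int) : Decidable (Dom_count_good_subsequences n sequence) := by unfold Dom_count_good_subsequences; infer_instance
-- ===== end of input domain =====

-- B replaces A's O(n) inner scan by the single update it can ever make (j = i + sequence[i]); objective: faster (asymptotic).

def pvMOD : Int := 998244353

-- ===== PORT A =====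
-- inner loop body of A: 'current_length += 1; if sequence[i] == current_length-1 and sequence[i] > 0: dp[j+1] = (dp[j+1]+dp[i]) % MOD'
-- (list indexing via getD; inside Pre_ every index accessed is in range, so this is exact; '%' with the positive
-- modulus 998244353 coincides with Python's '%')
def pvInnerA (sequence : List Int) (i : Nat) (st : List Int × Int) (j : Nat) : List Int × Int :=
  let current_length := st.2 + 1
  if sequence.getD i 0 = current_length - 1 ∧ sequence.getD i 0 > 0 then
    (st.1.set (j + 1) ((st.1.getD (j + 1) 0 + st.1.getD i 0) % pvMOD), current_length)
  else (st.1, current_length)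

def count_good_subsequences (n : Int) (sequence : List Int) : Int :=
  (((List.range n.toNat).foldl
      (fun dp i => ((List.range' i (n.toNat - i)).foldl (pvInnerA sequence i) (dp, 0)).1)
      ((List.replicate (n + 1).toNat (0 : Int)).set 0 1)).drop 1).sum % pvMOD

-- ===== PORT B =====
def count_good_subsequences_alt (n : Int) (sequence : List Int) : Int :=
  (((List.range n.toNat).foldl
      (fun dp i =>
        let s := sequence.getD i 0
        if s > 0 ∧ (i : Int) + s < n then
          dp.set (i + s.toNat + 1) ((dp.getD (i + s.toNat + 1) 0 + dp.getD i 0) % pvMOD)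
        else dp)
      ((List.replicate (n + 1).toNat (0 : Int)).set 0 1)).drop 1).sum % pvMOD

-- ===== PRECONDITION & SPEC =====
-- A raises IndexError when n < 0 (dp[0] on an empty list) or n > len(sequence) (sequence[i]); exactly those inputs are excluded.
def Pre_count_good_subsequences (n : Int) (sequence : List Int) : Prop :=
  0 ≤ n ∧ n ≤ (sequence.length : Int)
instance (n : Int) (sequence : List Int) : Decidable (Pre_count_good_subsequences n sequence) := by
  unfold Pre_count_good_subsequences; infer_instance
def pvWitness_count_good_subsequences : Int × List Int := (3, [1, 5, 1])

def Spec_count_good_subsequences (n : Int) (sequence : List Int) (out : Int) : Prop := out = count_good_subsequences_alt n sequence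
instance (n : Int) (sequence : List Int) (out : Int) : Decidable (Spec_count_good_subsequences n sequence out) := by unfold Spec_count_good_subsequences; infer_instance

-- ===== CLAIM (what is proved, stated in full; the proofs are below) =====
def Claim_equal_count_good_subsequences : Prop := ∀ (n : Int) (sequence : List Int), Dom_count_good_subsequences n sequence → Pre_count_good_subsequences n sequence → Spec_count_good_subsequences n sequence (count_good_subsequences n sequence)

-- ===== LEMMAS AND PROOFS =====

-- A's inner scan over j ∈ [a, a+k) fires at most once, at j with (j:Int) = i + sequence[i].
theorem pvInnerA_range' (sequence : List Int) (i : Nat) (si : Int) (hsi : si = sequence.getD i 0) :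
    ∀ (k a : Nat) (dp : List Int) (c : Int), c = (a : Int) - (i : Int) →
    ((List.range' a k).foldl (pvInnerA sequence i) (dp, c)).1 =
      if si > 0 ∧ (a : Int) ≤ (i : Int) + si ∧ (i : Int) + si < (a : Int) + (k : Int) then
        dp.set (i + si.toNat + 1) ((dp.getD (i + si.toNat + 1) 0 + dp.getD i 0) % pvMOD)
      else dp := by
  intro k
  induction k with
  | zero =>
      intro a dp c hc
      simp only [List.range'_zero, List.foldl_nil]
      rw [if_neg]; rintro ⟨_, h1, h2⟩; push_cast at h2; omega
  | succ k ih =>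
      intro a dp c hc
      rw [List.range'_succ, List.foldl_cons]
      by_cases hfire : sequence.getD i 0 = (c + 1) - 1 ∧ sequence.getD i 0 > 0
      · -- fires at j = a : si = a - i
        have hsa : si = (a : Int) - (i : Int) := by
          rcases hfire with ⟨h1, _⟩; rw [hsi, h1, hc]; ring
        have hspos : si > 0 := by rw [hsi]; exact hfire.2
        have hidx : i + si.toNat + 1 = a + 1 := by omega
        simp only [pvInnerA, if_pos hfire]
        rw [ih (a + 1) _ (c + 1) (by push_cast; omega)]
        rw [if_neg (by rintro ⟨_, h1, _⟩; push_cast at h1; omega)]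
        rw [if_pos ⟨hspos, by omega, by push_cast; omega⟩]
        rw [hidx]
      · have hne : ¬(si = (a : Int) - (i : Int) ∧ 0 < si) := by
          rintro ⟨h1, h2⟩
          exact hfire ⟨by rw [← hsi]; omega, by rw [← hsi]; exact h2⟩
        simp only [pvInnerA, if_neg hfire]
        rw [ih (a + 1) _ (c + 1) (by push_cast; omega)]
        split_ifs with h1 h2 h3
        · rfl
        · exfalso; rcases h1 with ⟨p, q, r⟩; push_cast at q r
          exact h2 ⟨p, by omega, by push_cast; omega⟩
        · exfalso; rcases h3 with ⟨p, q, r⟩; push_cast at q r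
          apply h1
          refine ⟨p, ?_, by push_cast; omega⟩
          by_cases heq : (i : Int) + si = (a : Int)
          · exact absurd ⟨by omega, p⟩ hne
          · push_cast; omega
        · rfl

theorem count_good_subsequences_eq_alt (n : Int) (sequence : List Int)
    (hn : 0 ≤ n) :
    count_good_subsequences n sequence = count_good_subsequences_alt n sequence := by
  have hcast : ((n.toNat : Nat) : Int) = n := Int.toNat_of_nonneg hn
  unfold count_good_subsequences count_good_subsequences_alt
  have hfold := PySem.List.foldl_congr_mem (List.range n.toNat)
    (fun dp i => ((List.range' i (n.toNat - i)).foldl (pvInnerA sequence i) (dp, 0)).1)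
    (fun dp i =>
      let s := sequence.getD i 0
      if s > 0 ∧ (i : Int) + s < n then
        dp.set (i + s.toNat + 1) ((dp.getD (i + s.toNat + 1) 0 + dp.getD i 0) % pvMOD)
      else dp)
    ((List.replicate (n + 1).toNat (0 : Int)).set 0 1) ?_
  · rw [hfold]
  intro dp i hi
  have hi' : i < n.toNat := List.mem_range.mp hi
  show ((List.range' i (n.toNat - i)).foldl (pvInnerA sequence i) (dp, 0)).1 =
    if sequence.getD i 0 > 0 ∧ (i : Int) + sequence.getD i 0 < n then
      dp.set (i + (sequence.getD i 0).toNat + 1)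
        ((dp.getD (i + (sequence.getD i 0).toNat + 1) 0 + dp.getD i 0) % pvMOD)
    else dp
  set si := sequence.getD i 0 with hsi
  rw [pvInnerA_range' sequence i si hsi (n.toNat - i) i dp 0 (by omega)]
  by_cases hc : si > 0 ∧ (i : Int) + si < n
  · rw [if_pos ?_, if_pos hc]
    refine ⟨hc.1, by omega, ?_⟩
    have := hc.2
    omega
  · rw [if_neg ?_, if_neg hc]
    rintro ⟨h0, _, h2⟩
    apply hc
    refine ⟨h0, ?_⟩
    omega

-- ===== VERDICT (by name: the statement is the Claim_ definition above) =====
theorem count_good_subsequences_spec : Claim_equal_count_good_subsequences := by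
  intro n sequence _ hpre
  unfold Spec_count_good_subsequences
  exact count_good_subsequences_eq_alt n sequence hpre.1
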